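-- pv_equiv track=rewrite | github.com/angelinn/HackBulgaria | week0/fibonacci_lists.py | fibonacci_lists
-- ===== SOURCE A (Python) =====
-- def fibonacci_lists(listA, listB, n):
--     first = listA
--     second = listB
--
--     if n == 1:
--         return first
--     if n == 2:
--         return second
--
--     for i in range(2, n):
--         result = first + second
--         first = second
--         second = result
--
--     return result
-- ===== SOURCE B (Python) =====
-- def _pair(a, b, k):
--     # returns (element k-1, element k) of the sequence, for k >= 2
--     if k == 2:
--         return (a, b)
--     f, s = _pair(a, b, k - 1)
--     return (s, f + s)
--
--
-- def fibonacci_lists(listA, listB, n):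
--     if n == 1:
--         return listA
--     return _pair(listA, listB, n)[1]
-- ===== Notes on version B (the rewrite author's own statement) =====
-- stated objective: alternative
-- what changed: Replaces the iterative loop that rolls a (first, second) pair with a direct recursion on n via a helper returning the (previous, current) pair.
import Mathlib
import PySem

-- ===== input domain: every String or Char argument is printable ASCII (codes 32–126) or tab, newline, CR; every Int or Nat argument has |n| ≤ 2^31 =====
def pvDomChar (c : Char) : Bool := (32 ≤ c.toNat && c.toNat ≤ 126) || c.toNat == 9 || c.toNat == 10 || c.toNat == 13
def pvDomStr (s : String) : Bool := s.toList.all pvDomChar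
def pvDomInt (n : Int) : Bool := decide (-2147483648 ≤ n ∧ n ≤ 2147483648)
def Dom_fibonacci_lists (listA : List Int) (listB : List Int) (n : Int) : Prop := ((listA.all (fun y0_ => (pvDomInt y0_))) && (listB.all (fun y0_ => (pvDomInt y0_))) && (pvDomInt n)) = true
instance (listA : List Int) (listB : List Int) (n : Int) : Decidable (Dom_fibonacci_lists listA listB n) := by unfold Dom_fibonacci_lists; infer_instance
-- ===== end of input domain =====

-- B replaces A's rolling-pair loop by a direct recursion on n via a pair-returning helper (alternative decomposition, same cost).
-- Pre_ excludes n ≤ 0, where Python A raises UnboundLocalError (`result` never assigned) and B raises RecursionError.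


-- ===== PORT A =====
-- loop state = (first, second, result); result starts unassigned (none = UnboundLocalError if read)
def fibonacci_lists (listA : List Int) (listB : List Int) (n : Int) : List Int :=
  if n = 1 then listA
  else if n = 2 then listB
  else
    let st := (PySem.List.pyRange 2 n 1).foldl
      (fun (st : List Int × List Int × Option (List Int)) _ =>
        let result := st.1 ++ st.2.1
        (st.2.1, result, some result))
      (listA, listB, none)
    st.2.2.getD []   -- none only when the loop body never ran (n ≤ 2), excluded by Pre_

-- ===== PORT B =====
-- helper _pair: recursion counted down to the base k = 2; ported with the Nat index k - 2
def fibPair (a : List Int) (b : List Int) : Nat → List Int × List Int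
  | 0 => (a, b)
  | k + 1 =>
    let p := fibPair a b k
    (p.2, p.1 ++ p.2)

def fibonacci_lists_alt (listA : List Int) (listB : List Int) (n : Int) : List Int :=
  if n = 1 then listA
  else (fibPair listA listB (n - 2).toNat).2

-- ===== PRECONDITION & SPEC =====
-- Pre_ excludes n ≤ 0: there Python A raises UnboundLocalError (`result` is never assigned).
def Pre_fibonacci_lists (listA : List Int) (listB : List Int) (n : Int) : Prop := 1 ≤ n
instance (listA : List Int) (listB : List Int) (n : Int) : Decidable (Pre_fibonacci_lists listA listB n) := by unfold Pre_fibonacci_lists; infer_instance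
def pvWitness_fibonacci_lists : List Int × List Int × Int := ([1, 2], [3], 5)
def Spec_fibonacci_lists (listA : List Int) (listB : List Int) (n : Int) (out : List Int) : Prop := out = fibonacci_lists_alt listA listB n
instance (listA : List Int) (listB : List Int) (n : Int) (out : List Int) : Decidable (Spec_fibonacci_lists listA listB n out) := by unfold Spec_fibonacci_lists; infer_instance

-- ===== CLAIM (what is proved, stated in full; the proofs are below) =====
def Claim_equal_fibonacci_lists : Prop := ∀ (listA : List Int) (listB : List Int) (n : Int), Dom_fibonacci_lists listA listB n → Pre_fibonacci_lists listA listB n → Spec_fibonacci_lists listA listB n (fibonacci_lists listA listB n)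

-- ===== LEMMAS AND PROOFS =====

theorem fibPair_shift (k : Nat) : ∀ (f s : List Int), fibPair f s (k + 1) = fibPair s (f ++ s) k := by
  induction k with
  | zero => intro f s; rfl
  | succ m ihm =>
    intro f s
    rw [show fibPair f s (m + 1 + 1)
          = ((fibPair f s (m + 1)).2, (fibPair f s (m + 1)).1 ++ (fibPair f s (m + 1)).2) from rfl,
        ihm f s]
    rfl

-- the loop body ignores the range element, and with third component `some st.2.1` it tracks fibPair
theorem foldl_step_eq (l : List Int) : ∀ (f s : List Int),
    l.foldl (fun (st : List Int × List Int × Option (List Int)) _ =>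
        let result := st.1 ++ st.2.1
        (st.2.1, result, some result)) (f, s, some s)
      = ((fibPair f s l.length).1, (fibPair f s l.length).2, some (fibPair f s l.length).2) := by
  induction l with
  | nil => intro f s; simp [fibPair]
  | cons x xs ih =>
    intro f s
    simp only [List.foldl_cons, List.length_cons]
    rw [ih s (f ++ s), fibPair_shift]

theorem fibonacci_lists_spec : Claim_equal_fibonacci_lists := by
  intro listA listB n _ hpre
  unfold Spec_fibonacci_lists fibonacci_lists fibonacci_lists_alt
  by_cases h1 : n = 1
  · simp [h1]
  · by_cases h2 : n = 2
    · subst h2; simp [fibPair]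
    · simp only [if_neg h1, if_neg h2]
      have h3 : (3 : Int) ≤ n := by
        unfold Pre_fibonacci_lists at hpre; omega
      -- peel the first loop iteration (i = 2), which assigns `result`
      rw [PySem.List.pyRange_one_cons (by omega : (2 : Int) < n)]
      simp only [List.foldl_cons]
      rw [foldl_step_eq]
      have hlen : (PySem.List.pyRange (2 + 1) n 1).length = (n - 3).toNat := by
        rw [PySem.List.length_pyRange_one]; omega
      rw [hlen]
      have hn : (n - 2).toNat = (n - 3).toNat + 1 := by omega
      rw [hn, fibPair_shift]
      simp
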